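-- pv_equiv track=rewrite | github.com/AlecXYZ/genomelody | mappings/nucleotides_to_chromatic.py | map_chromatic
-- ===== SOURCE A (Python) =====
-- chromatic_mapping = {
--     "A": 60, # C
--     "AA": 61, # Cis
--     "AAA": 62, # D
--     "C": 63, # Dis
--     "CC": 64, # E
--     "CCC": 65, # F
--     "G": 66, # Fis
--     "GG": 67, # G
--     "GGG": 68, # Gis
--     "T": 69, # A
--     "TT": 70, # Ais
--     "TTT": 71, # H
-- }
--
-- def map_chromatic(sequence, is_end):
--     """
--     Convert sequence of nucleotides into 2D notes array. The algorithm first splits the sequence into triplets and then converts them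
--     to notes based on the above dictionary. It returns the converted sequence and any leftover characters. In case when end of file flag
--     is set to true, it converts leftover characters too.
--
--     Arguments:
--         sequence (str): One line of file containing nucleotides.
--         is_end (bool): End of file flag.
--     """
--     mapped_sequence = []
--
--     # Not processing leftover
--     if is_end is False:
--         i = 0
--         # Process the sequence in groups of 3 characters
--         while i < len(sequence):
--             # Get the next 3 characters
--             triplet = sequence[i:i+3]
--
--             # If triplet is shorter than 3, return it as leftover - only at the end of sequence
--             if len(triplet) < 3:
--                 return mapped_sequence, triplet
--
--             # Whole triplet is in our mapping
--             if triplet in chromatic_mapping: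
--                 mapped_sequence.append([chromatic_mapping.get(triplet)])
--             # First pair is in our mapping
--             elif triplet[:2] in chromatic_mapping:
--                 mapped_sequence.append([chromatic_mapping.get(triplet[:2])])
--                 mapped_sequence.append([chromatic_mapping.get(triplet[2:])])
--             # Second pair is in our mapping
--             elif triplet[1:] in chromatic_mapping:
--                 mapped_sequence.append([chromatic_mapping.get(triplet[:1])])
--                 mapped_sequence.append([chromatic_mapping.get(triplet[1:])])
--             # Only single nucleotides in our mapping
--             else:
--                 mapped_sequence.append([chromatic_mapping.get(triplet[:1])])
--                 mapped_sequence.append([chromatic_mapping.get(triplet[1:2])])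
--                 mapped_sequence.append([chromatic_mapping.get(triplet[2:])])
--             i += 3  # Move to the next triplet
--     # Process leftover at the end of file - could be length of 2 or 1
--     else:
--         # Pair is in our mapping
--         if len(sequence) == 2:
--             if sequence in chromatic_mapping:
--                 mapped_sequence.append([chromatic_mapping.get(sequence)])
--             # Only single nucleotides in our mapping
--             else:
--                 mapped_sequence.append([chromatic_mapping.get(sequence[:1])])
--                 mapped_sequence.append([chromatic_mapping.get(sequence[1:2])])
--         # Only single nucleotid in our mapping
--         else:
--             mapped_sequence.append([chromatic_mapping.get(sequence)])
--
--     return mapped_sequence, ""  # No leftover, return empty string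
-- ===== SOURCE B (Python) =====
-- chromatic_mapping = {
--     "A": 60, # C
--     "AA": 61, # Cis
--     "AAA": 62, # D
--     "C": 63, # Dis
--     "CC": 64, # E
--     "CCC": 65, # F
--     "G": 66, # Fis
--     "GG": 67, # G
--     "GGG": 68, # Gis
--     "T": 69, # A
--     "TT": 70, # Ais
--     "TTT": 71, # H
-- }
--
-- def _runs(s):
--     """One pass over s, grouping maximal runs of equal characters; the mapping's
--     keys are exactly such runs (one nucleotide repeated 1-3 times)."""
--     notes = []
--     cur = ""
--     k = 0
--     for ch in s:
--         if k and ch == cur: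
--             k += 1
--         else:
--             if k:
--                 notes.append([chromatic_mapping.get(cur * k)])
--             cur, k = ch, 1
--     if k:
--         notes.append([chromatic_mapping.get(cur * k)])
--     return notes
--
-- def map_chromatic(sequence, is_end):
--     """Run-length grouping: equal-character runs inside each frame are the mapping's keys."""
--     if is_end:
--         if len(sequence) == 2:
--             return _runs(sequence), ""
--         return [[chromatic_mapping.get(sequence)]], ""
--     full = len(sequence) - len(sequence) % 3
--     notes = []
--     for i in range(0, full, 3):
--         notes.extend(_runs(sequence[i:i + 3]))
--     return notes, sequence[full:]
-- ===== Notes on version B (the rewrite author's own statement) =====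
-- stated objective: alternative
-- what changed: A's 4-way dict-membership if/elif chain per triplet is replaced by run-length grouping: since the mapping's keys are exactly runs of one repeated nucleotide, B splits each frame into maximal runs of equal characters by character comparison and looks up each run, performing no membership tests at all.
-- outside the precondition, e.g. on map_chromatic('XXG', False): A returns ([[None], [None], [66]], ''), B returns ([[None], [66]], ''); on map_chromatic('XX', True): A returns ([[None], [None]], ''), B returns ([[None]], ''); on map_chromatic('ACG', True): A returns ([[None]], ''), B returns ([[None]], '')
import Mathlib
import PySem

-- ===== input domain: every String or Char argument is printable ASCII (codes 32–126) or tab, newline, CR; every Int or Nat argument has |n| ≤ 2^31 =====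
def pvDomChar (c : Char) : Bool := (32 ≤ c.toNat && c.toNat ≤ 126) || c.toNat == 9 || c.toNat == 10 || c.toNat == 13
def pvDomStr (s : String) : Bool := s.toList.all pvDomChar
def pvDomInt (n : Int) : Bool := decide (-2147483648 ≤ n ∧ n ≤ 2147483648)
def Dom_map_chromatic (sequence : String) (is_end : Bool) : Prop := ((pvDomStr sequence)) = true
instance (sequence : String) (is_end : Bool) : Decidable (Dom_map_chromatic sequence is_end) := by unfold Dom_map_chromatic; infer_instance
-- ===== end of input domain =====

-- B replaces A's 4-way dict-membership branch chain per triplet by run-length grouping of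
-- equal characters (the mapping's keys are exactly such runs); objective: alternative, same cost.

-- ===== PORT A =====
-- the module-level dict chromatic_mapping
def chromDict : PySem.Dict String Int :=
  PySem.Dict.ofList [("A",60),("AA",61),("AAA",62),("C",63),("CC",64),("CCC",65),
                     ("G",66),("GG",67),("GGG",68),("T",69),("TT",70),("TTT",71)]

-- chromatic_mapping.get(s): on every input admitted by Pre_ the lookup hits; the -1 default
-- stands for Python's None, which Pre_ excludes from the claim (None is not an Int).
def cmGet (s : List Char) : Int := (chromDict.get? (String.mk s)).getD (-1)
-- s in chromatic_mapping
def cmHas (s : List Char) : Bool := chromDict.contains (String.mk s)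

-- A's while loop over i; sequence[i:i+3] with nonneg i is realised by pattern-matching the next
-- three characters (exactly Python's clamped slice: fewer than 3 left → the shorter slice, the
-- 'len(triplet) < 3' leftover return); slices of the 3-char triplet are written out on the pattern.
def mapLoopA : List Char → List (List Int) → List (List Int) × String
  | [], acc => (acc, "")                                  -- loop ends, bottom 'return mapped_sequence, ""'
  | c1 :: c2 :: c3 :: rest, acc =>
      let acc' :=
        if cmHas [c1, c2, c3] then                        -- triplet in mapping
          acc ++ [[cmGet [c1, c2, c3]]]
        else if cmHas [c1, c2] then                       -- triplet[:2] in mapping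
          acc ++ [[cmGet [c1, c2]], [cmGet [c3]]]
        else if cmHas [c2, c3] then                       -- triplet[1:] in mapping
          acc ++ [[cmGet [c1]], [cmGet [c2, c3]]]
        else                                              -- three singles
          acc ++ [[cmGet [c1]], [cmGet [c2]], [cmGet [c3]]]
      mapLoopA rest acc'
  | cs, acc => (acc, String.mk cs)                        -- len(triplet) < 3: leftover return

def map_chromatic (sequence : String) (is_end : Bool) : List (List Int) × String :=
  if is_end = false then
    mapLoopA sequence.toList []
  else
    let cs := sequence.toList
    if cs.length == 2 then
      if cmHas cs then ([[cmGet cs]], "")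
      else ([[cmGet (cs.take 1)], [cmGet ((cs.drop 1).take 1)]], "")
    else ([[cmGet cs]], "")

-- ===== PORT B =====
-- _runs: the 'for ch in s' loop carrying (notes, cur, k); 'cur * k' is List.replicate k cur;
-- the trailing 'if k: notes.append(...)' is the [] case.
def runsGo : List Char → Char → Nat → List (List Int) → List (List Int)
  | [], cur, k, notes =>
      if k ≠ 0 then notes ++ [[cmGet (List.replicate k cur)]] else notes
  | ch :: rest, cur, k, notes =>
      if k ≠ 0 ∧ ch == cur then runsGo rest cur (k + 1) notes
      else runsGo rest ch 1
        (if k ≠ 0 then notes ++ [[cmGet (List.replicate k cur)]] else notes)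

-- _runs(s): notes = [], cur = "", k = 0 (cur is never read while k = 0; 'A' stands for "")
def runSplit (s : List Char) : List (List Int) := runsGo s 'A' 0 []

-- 'for i in range(0, full, 3): notes.extend(_runs(...))': the argument has length full
-- (a multiple of 3), consumed three characters at a time
def runChunks : List Char → List (List Int)
  | c1 :: c2 :: c3 :: rest => runSplit [c1, c2, c3] ++ runChunks rest
  | _ => []

def map_chromatic_alt (sequence : String) (is_end : Bool) : List (List Int) × String :=
  let cs := sequence.toList
  if is_end then
    if cs.length == 2 then (runSplit cs, "")
    else ([[cmGet cs]], "")
  else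
    let full := cs.length - cs.length % 3
    (runChunks (cs.take full), String.mk (cs.drop full))

-- ===== PRECONDITION & SPEC =====
-- Pre_ excludes exactly the inputs on which A's returned lists contain Python's None (a value
-- that is not an int, hence outside the declared List (List Int) type): any character outside
-- "ACGT" reached by a lookup, and with is_end=True any sequence that is neither of length 2
-- nor itself a key of the mapping.
def Pre_map_chromatic (sequence : String) (is_end : Bool) : Prop :=
  if is_end then
    (sequence.toList.length = 2 ∧ sequence.toList.all (fun c => c ∈ ['A','C','G','T']) = true)
    ∨ sequence ∈ ["A","AA","AAA","C","CC","CCC","G","GG","GGG","T","TT","TTT"]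
  else (sequence.toList.take (sequence.toList.length - sequence.toList.length % 3)).all
         (fun c => c ∈ ['A','C','G','T']) = true
instance (sequence : String) (is_end : Bool) : Decidable (Pre_map_chromatic sequence is_end) := by
  unfold Pre_map_chromatic; infer_instance

def pvWitness_map_chromatic : String × Bool := ("ACGTTA", false)

def Spec_map_chromatic (sequence : String) (is_end : Bool) (out : List (List Int) × String) : Prop := out = map_chromatic_alt sequence is_end
instance (sequence : String) (is_end : Bool) (out : List (List Int) × String) : Decidable (Spec_map_chromatic sequence is_end out) := by unfold Spec_map_chromatic; infer_instance

-- ===== CLAIM (what is proved, stated in full; the proofs are below) =====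
def Claim_equal_map_chromatic : Prop := ∀ (sequence : String) (is_end : Bool), Dom_map_chromatic sequence is_end → Pre_map_chromatic sequence is_end → Spec_map_chromatic sequence is_end (map_chromatic sequence is_end)

-- ===== LEMMAS AND PROOFS =====

-- on a triplet of A/C/G/T characters, A's 4-way membership branch equals run-length grouping
theorem runs_triplet (c1 c2 c3 : Char)
    (h1 : c1 ∈ ['A','C','G','T']) (h2 : c2 ∈ ['A','C','G','T']) (h3 : c3 ∈ ['A','C','G','T']) :
    (if cmHas [c1, c2, c3] then [[cmGet [c1, c2, c3]]]
     else if cmHas [c1, c2] then [[cmGet [c1, c2]], [cmGet [c3]]]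
     else if cmHas [c2, c3] then [[cmGet [c1]], [cmGet [c2, c3]]]
     else [[cmGet [c1]], [cmGet [c2]], [cmGet [c3]]]) = runSplit [c1, c2, c3] := by
  fin_cases h1 <;> fin_cases h2 <;> fin_cases h3 <;> decide

-- on a pair of A/C/G/T characters, A's is_end length-2 branch equals run-length grouping
theorem runs_pair (c1 c2 : Char)
    (h1 : c1 ∈ ['A','C','G','T']) (h2 : c2 ∈ ['A','C','G','T']) :
    (if cmHas [c1, c2] then ([[cmGet [c1, c2]]] : List (List Int))
     else [[cmGet [c1]], [cmGet [c2]]]) = runSplit [c1, c2] := by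
  fin_cases h1 <;> fin_cases h2 <;> decide

-- main loop invariant: A's triplet loop = B's chunked run grouping plus B's leftover slice
theorem loop_eq (n : Nat) : ∀ (cs : List Char), cs.length ≤ n →
    (cs.take (cs.length - cs.length % 3)).all (fun c => c ∈ ['A','C','G','T']) = true →
    ∀ (acc : List (List Int)),
    mapLoopA cs acc =
      (acc ++ runChunks (cs.take (cs.length - cs.length % 3)),
       String.mk (cs.drop (cs.length - cs.length % 3))) := by
  induction n with
  | zero =>
      intro cs hlen _ acc
      have : cs = [] := List.length_eq_zero_iff.mp (Nat.le_zero.mp hlen)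
      subst this
      show (acc, "") = (acc ++ runChunks [], String.mk [])
      simp [runChunks]; rfl
  | succ n ih =>
      intro cs hlen hgood acc
      match cs with
      | [] => show (acc, "") = (acc ++ runChunks [], String.mk []); simp [runChunks]; rfl
      | [c1] => show (acc, _) = _; simp [runChunks]
      | [c1, c2] => show (acc, _) = _; simp [runChunks]
      | c1 :: c2 :: c3 :: rest =>
          simp only [List.length_cons] at hlen
          have hfull : (c1 :: c2 :: c3 :: rest).length - (c1 :: c2 :: c3 :: rest).length % 3
              = (rest.length - rest.length % 3) + 3 := by
            simp only [List.length_cons]; omega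
          have htake : (c1 :: c2 :: c3 :: rest).take ((rest.length - rest.length % 3) + 3)
              = c1 :: c2 :: c3 :: rest.take (rest.length - rest.length % 3) := rfl
          have hdrop : (c1 :: c2 :: c3 :: rest).drop ((rest.length - rest.length % 3) + 3)
              = rest.drop (rest.length - rest.length % 3) := rfl
          rw [hfull] at hgood
          rw [htake] at hgood
          simp only [List.all_cons, Bool.and_eq_true] at hgood
          obtain ⟨g1, g2, g3, grest⟩ := hgood
          rw [hfull, htake, hdrop]
          have hacc : (if cmHas [c1, c2, c3] then acc ++ [[cmGet [c1, c2, c3]]]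
              else if cmHas [c1, c2] then acc ++ [[cmGet [c1, c2]], [cmGet [c3]]]
              else if cmHas [c2, c3] then acc ++ [[cmGet [c1]], [cmGet [c2, c3]]]
              else acc ++ [[cmGet [c1]], [cmGet [c2]], [cmGet [c3]]])
              = acc ++ runSplit [c1, c2, c3] := by
            rw [← runs_triplet c1 c2 c3 (of_decide_eq_true g1) (of_decide_eq_true g2) (of_decide_eq_true g3)]
            split_ifs <;> rfl
          show mapLoopA rest _ = (acc ++ runChunks (c1 :: c2 :: c3 :: rest.take _), _)
          show mapLoopA rest _ = (acc ++ (runSplit [c1, c2, c3] ++ runChunks (rest.take _)), _)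
          rw [hacc, ih rest (by omega) grest]
          simp [List.append_assoc]

-- ===== VERDICT (by name: the statement is the Claim_ definition above) =====
theorem map_chromatic_spec : Claim_equal_map_chromatic := by
  intro sequence is_end _hdom hpre
  unfold Spec_map_chromatic
  cases is_end with
  | true =>
      unfold Pre_map_chromatic at hpre
      rcases hpre with ⟨hlen, hall⟩ | hmem
      · obtain ⟨c1, c2, hc⟩ : ∃ c1 c2, sequence.toList = [c1, c2] := by
          match hseq : sequence.toList, hlen with
          | [c1, c2], _ => exact ⟨c1, c2, rfl⟩
        rw [hc] at hall
        simp only [List.all_cons, List.all_nil, Bool.and_eq_true] at hall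
        obtain ⟨h1, h2, -⟩ := hall
        show map_chromatic sequence true = map_chromatic_alt sequence true
        unfold map_chromatic map_chromatic_alt
        rw [hc]
        simp only [Bool.true_eq_false, if_false, if_true, List.length_cons, List.length_nil]
        simp only [if_pos (show ((0 + 1 + 1 : Nat) == 2) = true from rfl)]
        rw [← runs_pair c1 c2 (of_decide_eq_true h1) (of_decide_eq_true h2)]
        split_ifs <;> rfl
      · fin_cases hmem <;> decide
  | false =>
      unfold Pre_map_chromatic at hpre
      simp only [if_neg (by simp : ¬(false = true))] at hpre
      show mapLoopA sequence.toList [] = _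
      rw [loop_eq sequence.toList.length sequence.toList le_rfl hpre []]
      rfl
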